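-- pv_equiv track=rewrite | github.com/martinmargonari/Algoritmos1 | 9/9-4.py | oraciones_mas_largas
-- ===== SOURCE A (Python) =====
-- def oraciones_mas_largas(texto):
--     oraciones = texto.split(".")
--     dict = {}
--     for oracion in oraciones:
--         for letra in oracion:
--             anterior = dict.get(letra.lower(), '')
--             if len(anterior) < len(oracion):
--                 dict[letra.lower()] = oracion
--
--     return dict
-- ===== SOURCE B (Python) =====
-- def oraciones_mas_largas(texto):
--     oraciones = texto.split(".")
--     letras = dict.fromkeys("".join(oraciones).lower())
--     return {l: max([o for o in oraciones if l in o.lower()], key=len, default='')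
--             for l in letras}
-- ===== Notes on version B (the rewrite author's own statement) =====
-- stated objective: simpler
-- what changed: Instead of A's running-best dict updated per character with repeated length comparisons, B collects the distinct lowercased letters once (dict.fromkeys of the joined text) and builds the result in one comprehension, mapping each letter to the max-by-length (first on ties) of the sentences containing it.
import Mathlib
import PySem

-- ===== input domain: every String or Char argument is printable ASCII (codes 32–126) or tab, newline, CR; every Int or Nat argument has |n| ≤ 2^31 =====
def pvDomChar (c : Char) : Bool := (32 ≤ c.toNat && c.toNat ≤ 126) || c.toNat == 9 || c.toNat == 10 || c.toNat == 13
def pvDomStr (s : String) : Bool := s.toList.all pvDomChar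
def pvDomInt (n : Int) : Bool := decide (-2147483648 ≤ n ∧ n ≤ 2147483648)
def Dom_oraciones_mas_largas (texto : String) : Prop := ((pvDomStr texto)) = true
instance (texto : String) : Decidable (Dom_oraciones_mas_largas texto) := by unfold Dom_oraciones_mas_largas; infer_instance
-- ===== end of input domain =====

-- B replaces A's per-character running-best dict updates by collecting the distinct
-- lowercased letters once and mapping each letter directly to the max-by-length
-- (first on ties) sentence containing it (objective: simpler).

-- ===== PORT A =====
def oraciones_mas_largas (texto : String) : List (String × String) :=
  let oraciones := (PySem.Str.split? texto ".").getD []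
  let d := oraciones.foldl (fun d oracion =>
    oracion.toList.foldl (fun d letra =>
      let anterior := PySem.Dict.getD d (PySem.Str.lower (String.ofList [letra])) ""
      if PySem.Str.len anterior < PySem.Str.len oracion then
        PySem.Dict.insert d (PySem.Str.lower (String.ofList [letra])) oracion
      else d) d) (PySem.Dict.empty : PySem.Dict String String)
  d.items

-- ===== PORT B =====
def oraciones_mas_largas_alt (texto : String) : List (String × String) :=
  let oraciones := (PySem.Str.split? texto ".").getD []
  let letras := PySem.List.dedup (PySem.Str.lower (PySem.Str.join "" oraciones)).toList
  letras.map (fun l =>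
    (String.ofList [l],
      PySem.List.maxD
        (oraciones.filter (fun o => PySem.Str.isIn (String.ofList [l]) (PySem.Str.lower o)))
        PySem.Str.len ""))

-- ===== PRECONDITION & SPEC =====
def Spec_oraciones_mas_largas (texto : String) (out : List (String × String)) : Prop := out = oraciones_mas_largas_alt texto
instance (texto : String) (out : List (String × String)) : Decidable (Spec_oraciones_mas_largas texto out) := by unfold Spec_oraciones_mas_largas; infer_instance

-- ===== CLAIM (what is proved, stated in full; the proofs are below) =====
def Claim_equal_oraciones_mas_largas : Prop := ∀ (texto : String), Dom_oraciones_mas_largas texto → Spec_oraciones_mas_largas texto (oraciones_mas_largas texto)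

-- ===== LEMMAS AND PROOFS =====

lemma pv_beq (a b : Char) : (String.ofList [a] == String.ofList [b]) = (a == b) := by
  by_cases h : a = b
  · simp [h]
  · have hne : String.ofList [a] ≠ String.ofList [b] := fun hh => h (by
      have := congrArg String.toList hh; simpa using this)
    simp [h, hne]

lemma pv_getD_map (ks : List Char) (g : Char → String) (l : Char) :
    PySem.Dict.getD (⟨ks.map (fun c => (String.ofList [c], g c))⟩ : PySem.Dict String String)
      (String.ofList [l]) "" = if l ∈ ks then g l else "" := by
  induction ks with
  | nil => simp [PySem.Dict.getD, PySem.Dict.get?]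
  | cons k t ih =>
    by_cases hk : k = l
    · simp_all [PySem.Dict.getD, PySem.Dict.get?, pv_beq]
    · have hk' : ¬ l = k := fun h => hk h.symm
      simp_all [PySem.Dict.getD, PySem.Dict.get?, pv_beq, hk, hk']

lemma pv_contains_map (ks : List Char) (g : Char → String) (l : Char) :
    PySem.Dict.contains (⟨ks.map (fun c => (String.ofList [c], g c))⟩ : PySem.Dict String String)
      (String.ofList [l]) = decide (l ∈ ks) := by
  induction ks with
  | nil => simp [PySem.Dict.contains]
  | cons k t ih =>
    by_cases hk : k = l
    · simp_all [PySem.Dict.contains, pv_beq]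
    · have hk' : ¬ l = k := fun h => hk h.symm
      simp_all [PySem.Dict.contains, pv_beq, hk, hk']

lemma pv_insert_mem (ks : List Char) (g : Char → String) (l : Char) (v : String) (h : l ∈ ks) :
    PySem.Dict.insert (⟨ks.map (fun c => (String.ofList [c], g c))⟩ : PySem.Dict String String)
      (String.ofList [l]) v
    = ⟨ks.map (fun c => (String.ofList [c], if c = l then v else g c))⟩ := by
  have hc := pv_contains_map ks g l
  simp only [PySem.Dict.insert, hc, decide_eq_true_eq, h, if_pos]
  congr 1
  simp only [PySem.Dict.items, List.map_map]
  apply List.map_congr_left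
  intro c _
  by_cases hcl : c = l
  · subst hcl; simp
  · have hne : ¬ String.ofList [c] = String.ofList [l] := fun hh => hcl (by
      have := congrArg String.toList hh; simpa using this)
    simp [beq_iff_eq, hne, hcl]

lemma pv_insert_not_mem (ks : List Char) (g : Char → String) (l : Char) (v : String) (h : l ∉ ks) :
    PySem.Dict.insert (⟨ks.map (fun c => (String.ofList [c], g c))⟩ : PySem.Dict String String)
      (String.ofList [l]) v
    = ⟨(ks ++ [l]).map (fun c => (String.ofList [c], if c = l then v else g c))⟩ := by
  have hc := pv_contains_map ks g l
  simp only [PySem.Dict.insert, hc, decide_eq_true_eq, h, if_neg, if_false]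
  congr 1
  simp only [PySem.Dict.items, List.map_append, List.map_cons, List.map_nil]
  congr 1
  · apply List.map_congr_left
    intro c hcks
    have : ¬ (c = l) := fun hh => h (hh ▸ hcks)
    simp [this]

def pvStep (d : PySem.Dict String String) (p : String × Char) : PySem.Dict String String :=
  if PySem.Str.len (PySem.Dict.getD d (PySem.Str.lower (String.ofList [p.2])) "") < PySem.Str.len p.1 then
    PySem.Dict.insert d (PySem.Str.lower (String.ofList [p.2])) p.1
  else d

def pvVal (c : Char) (init : String) (ps : List (String × Char)) : String :=
  ps.foldl (fun a p => if PySem.Chars.lowerChar p.2 = c ∧ PySem.Str.len a < PySem.Str.len p.1 then p.1 else a) init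

def pvKeys (ks : List Char) (ps : List (String × Char)) : List Char :=
  ps.foldl (fun s p => PySem.Set.add s (PySem.Chars.lowerChar p.2)) ks

lemma pv_lower_mk1 (c : Char) :
    PySem.Str.lower (String.ofList [c]) = String.ofList [PySem.Chars.lowerChar c] := by
  rw [← String.toList_inj]
  simp [PySem.Str.toList_lower, PySem.Chars.lower]

lemma pv_len_pos (s : String) (h : s ≠ "") : 0 < PySem.Str.len s := by
  simp only [PySem.Str.len]
  have : s.toList ≠ [] := by
    intro hh
    apply h
    rw [← String.ofList_toList (s := s), hh]
  have := List.length_pos_iff.mpr this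
  exact_mod_cast this

lemma pv_inv : ∀ (ps : List (String × Char)), (∀ p ∈ ps, p.1 ≠ "") →
    ∀ (ks : List Char) (g : Char → String), (∀ c ∈ ks, g c ≠ "") →
    List.foldl pvStep (⟨ks.map (fun c => (String.ofList [c], g c))⟩ : PySem.Dict String String) ps
      = ⟨(pvKeys ks ps).map (fun c => (String.ofList [c], pvVal c (if c ∈ ks then g c else "") ps))⟩ := by
  intro ps
  induction ps with
  | nil =>
    intro _ ks g _
    simp only [List.foldl_nil, pvKeys, pvVal]
    congr 1
    apply List.map_congr_left
    intro c hc
    simp [hc]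
  | cons p t ih =>
    intro Hne ks g hg
    have hp1 : p.1 ≠ "" := Hne p (List.mem_cons_self ..)
    have Hnet : ∀ q ∈ t, q.1 ≠ "" := fun q hq => Hne q (List.mem_cons_of_mem _ hq)
    set l := PySem.Chars.lowerChar p.2 with hl
    have hsetadd_mem : ∀ (h : l ∈ ks), PySem.Set.add ks l = ks := by
      intro h; simp [PySem.Set.add, h]
    have hsetadd_not : ∀ (h : l ∉ ks), PySem.Set.add ks l = ks ++ [l] := by
      intro h; simp [PySem.Set.add, h]
    simp only [List.foldl_cons]
    have hps : pvStep (⟨ks.map (fun c => (String.ofList [c], g c))⟩ : PySem.Dict String String) p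
        = if PySem.Str.len (if l ∈ ks then g l else "") < PySem.Str.len p.1 then
            PySem.Dict.insert (⟨ks.map (fun c => (String.ofList [c], g c))⟩ : PySem.Dict String String)
              (String.ofList [l]) p.1
          else ⟨ks.map (fun c => (String.ofList [c], g c))⟩ := by
      simp only [pvStep, pv_lower_mk1, pv_getD_map, ← hl]
    rw [hps]
    by_cases hm : l ∈ ks
    · by_cases hf : PySem.Str.len (g l) < PySem.Str.len p.1
      · rw [if_pos (by simpa [hm] using hf), pv_insert_mem ks g l p.1 hm]
        rw [ih Hnet ks (fun c => if c = l then p.1 else g c)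
            (fun c hc => by by_cases h2 : c = l <;> simp [h2, hp1, hg c hc])]
        have hk : pvKeys ks (p :: t) = pvKeys ks t := by
          simp only [pvKeys, List.foldl_cons, ← hl, hsetadd_mem hm]
        rw [hk]
        congr 1
        apply List.map_congr_left
        intro c _
        congr 1
        simp only [pvVal, List.foldl_cons, ← hl]
        congr 1
        by_cases h2 : c = l
        · subst h2
          have hf' : (g l).length < p.1.length := by simpa [PySem.Str.len] using hf
          simp [hm, hf']
        · have h2' : ¬ (l = c) := fun hh => h2 hh.symm
          simp [h2, h2']
      · rw [if_neg (by simpa [hm] using hf)]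
        rw [ih Hnet ks g hg]
        have hk : pvKeys ks (p :: t) = pvKeys ks t := by
          simp only [pvKeys, List.foldl_cons, ← hl, hsetadd_mem hm]
        rw [hk]
        congr 1
        apply List.map_congr_left
        intro c _
        congr 1
        simp only [pvVal, List.foldl_cons, ← hl]
        congr 1
        by_cases h2 : c = l
        · subst h2
          have hf' : ¬ (g l).length < p.1.length := by simpa [PySem.Str.len] using hf
          simp [hm, hf']
        · have h2' : ¬ (l = c) := fun hh => h2 hh.symm
          simp [h2']
    · have hf : PySem.Str.len ("" : String) < PySem.Str.len p.1 := by
        simpa [PySem.Str.len] using pv_len_pos p.1 hp1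
      rw [if_pos (by simpa [hm] using hf), pv_insert_not_mem ks g l p.1 hm]
      rw [ih Hnet (ks ++ [l]) (fun c => if c = l then p.1 else g c)
          (fun c hc => by by_cases h2 : c = l <;> simp_all [h2, hp1])]
      have hk : pvKeys ks (p :: t) = pvKeys (ks ++ [l]) t := by
        simp only [pvKeys, List.foldl_cons, ← hl, hsetadd_not hm]
      rw [hk]
      congr 1
      apply List.map_congr_left
      intro c _
      congr 1
      simp only [pvVal, List.foldl_cons, ← hl]
      congr 1
      by_cases h2 : c = l
      · subst h2
        have hf' : 0 < p.1.length := by simpa [PySem.Str.len] using hf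
        simp [hm, hf']
      · have h2' : ¬ (l = c) := fun hh => h2 hh.symm
        by_cases h3 : c ∈ ks <;> simp [h2, h2', h3]

def pvPairs (os : List String) : List (String × Char) :=
  os.flatMap (fun o => o.toList.map (fun c => (o, c)))

lemma pv_intercalate_nil (l : List (List Char)) : List.intercalate [] l = l.flatten := by
  induction l with
  | nil => simp [List.intercalate]
  | cons x t ih =>
    cases t with
    | nil => simp [List.intercalate]
    | cons y u =>
      simp only [List.intercalate, List.intersperse] at *
      simp_all [List.flatten]

lemma pv_pairs_ne (os : List String) : ∀ p ∈ pvPairs os, p.1 ≠ "" := by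
  intro p hp
  simp only [pvPairs, List.mem_flatMap, List.mem_map] at hp
  obtain ⟨o, _, c, hc, rfl⟩ := hp
  intro h
  rw [← String.ofList_toList (s := o)] at h
  have : o.toList = [] := by
    have := congrArg String.toList h
    simpa using this
  simp [this] at hc

lemma pv_keys_eq (os : List String) :
    pvKeys [] (pvPairs os)
      = PySem.List.dedup ((PySem.Str.lower (PySem.Str.join "" os)).toList) := by
  have h1 : pvKeys [] (pvPairs os)
      = PySem.Set.ofList ((pvPairs os).map (fun p => PySem.Chars.lowerChar p.2)) := by
    simp only [pvKeys, PySem.Set.ofList, List.foldl_map, PySem.Set.empty]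
  rw [h1]
  have h2 : (pvPairs os).map (fun p => PySem.Chars.lowerChar p.2)
      = ((PySem.Str.lower (PySem.Str.join "" os)).toList) := by
    simp only [PySem.Str.toList_lower, PySem.Str.toList_join, PySem.Chars.join,
      PySem.Chars.lower, pvPairs, List.map_flatMap, List.map_map]
    have he : ("" : String).toList = [] := by simp
    rw [he, pv_intercalate_nil]
    rw [List.flatMap_def, List.map_flatten, List.map_map]
    congr 1
  rw [h2]
  rfl

lemma pv_val_sentence (c : Char) (o : String) :
    ∀ (cs : List Char) (a : String),
    cs.foldl (fun a ch => if PySem.Chars.lowerChar ch = c ∧ PySem.Str.len a < PySem.Str.len o then o else a) a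
      = if (∃ ch ∈ cs, PySem.Chars.lowerChar ch = c) ∧ PySem.Str.len a < PySem.Str.len o then o else a := by
  intro cs
  induction cs with
  | nil => intro a; simp
  | cons ch t ih =>
    intro a
    simp only [List.foldl_cons]
    by_cases h1 : PySem.Chars.lowerChar ch = c
    · by_cases h2 : PySem.Str.len a < PySem.Str.len o
      · rw [if_pos ⟨h1, h2⟩, ih o,
          if_neg (fun hh => (lt_irrefl _ hh.2)),
          if_pos ⟨⟨ch, by simp, h1⟩, h2⟩]
      · rw [if_neg (fun hh => h2 hh.2), ih a,
          if_neg (fun hh => h2 hh.2), if_neg (fun hh => h2 hh.2)]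
    · rw [if_neg (fun hh => h1 hh.1), ih a]
      by_cases h3 : ∃ ch' ∈ t, PySem.Chars.lowerChar ch' = c
      · obtain ⟨x, hx, e⟩ := h3
        have h3 : ∃ ch' ∈ t, PySem.Chars.lowerChar ch' = c := ⟨x, hx, e⟩
        have h3' : ∃ ch' ∈ ch :: t, PySem.Chars.lowerChar ch' = c :=
          ⟨x, List.mem_cons_of_mem _ hx, e⟩
        by_cases q : PySem.Str.len a < PySem.Str.len o
        · rw [if_pos ⟨h3, q⟩, if_pos ⟨h3', q⟩]
        · rw [if_neg (fun hh => q hh.2), if_neg (fun hh => q hh.2)]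
      · have h3' : ¬ ∃ ch' ∈ ch :: t, PySem.Chars.lowerChar ch' = c := by
          rintro ⟨x, hx, e⟩
          rcases List.mem_cons.mp hx with rfl | hx
          · exact h1 e
          · exact h3 ⟨x, hx, e⟩
        rw [if_neg (fun hh => h3 hh.1), if_neg (fun hh => h3' hh.1)]

lemma pv_max?_cons (xs : List String) : ∀ (m : String),
    PySem.List.max? (m :: xs) PySem.Str.len
      = some (xs.foldl (fun a o => if PySem.Str.len a < PySem.Str.len o then o else a) m) := by
  induction xs with
  | nil => intro m; simp [PySem.List.max?]
  | cons x u ih =>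
    intro m
    have hstep : PySem.List.max? (m :: x :: u) PySem.Str.len
        = PySem.List.max? ((if PySem.Str.len m < PySem.Str.len x then x else m) :: u) PySem.Str.len := by
      by_cases h : PySem.Str.len m < PySem.Str.len x
      · have h' : m.length < x.length := by simpa [PySem.Str.len] using h
        simp [PySem.List.max?, h']
      · have h' : ¬ m.length < x.length := by simpa [PySem.Str.len] using h
        simp [PySem.List.max?, h']
    rw [hstep, ih]
    simp only [List.foldl_cons]

lemma pv_val_eq (c : Char) (os : List String) :
    pvVal c "" (pvPairs os)
      = PySem.List.maxD
          (os.filter (fun o => PySem.Str.isIn (String.ofList [c]) (PySem.Str.lower o)))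
          PySem.Str.len "" := by
  -- 1: collapse the flatMap fold into a per-sentence fold
  have h1 : ∀ (a : String), pvVal c a (pvPairs os)
      = os.foldl (fun a o => if (∃ ch ∈ o.toList, PySem.Chars.lowerChar ch = c)
            ∧ PySem.Str.len a < PySem.Str.len o then o else a) a := by
    induction os with
    | nil => intro a; simp [pvVal, pvPairs]
    | cons o t ih =>
      intro a
      simp only [pvPairs, List.flatMap_cons, pvVal, List.foldl_append, List.foldl_cons, List.foldl_map]
      rw [← pvVal, ← pvPairs, ih, pv_val_sentence]
  rw [h1]
  -- 2: nested-if form, then fold over filter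
  have h2 : (fun (a : String) (o : String) => if (∃ ch ∈ o.toList, PySem.Chars.lowerChar ch = c)
        ∧ PySem.Str.len a < PySem.Str.len o then o else a)
      = (fun a o => if (∃ ch ∈ o.toList, PySem.Chars.lowerChar ch = c) then
          (if PySem.Str.len a < PySem.Str.len o then o else a) else a) := by
    funext a o
    by_cases hP : ∃ ch ∈ o.toList, PySem.Chars.lowerChar ch = c
    · by_cases hQ : PySem.Str.len a < PySem.Str.len o
      · rw [if_pos ⟨hP, hQ⟩, if_pos hP, if_pos hQ]
      · rw [if_neg (fun hh => hQ hh.2), if_pos hP, if_neg hQ]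
    · rw [if_neg (fun hh => hP hh.1), if_neg hP]
  rw [h2, PySem.List.foldl_ite_eq_foldl_filter
    (p := fun o => ∃ ch ∈ o.toList, PySem.Chars.lowerChar ch = c)
    (f := fun a o => if PySem.Str.len a < PySem.Str.len o then o else a)]
  -- 3: the filter predicate is B's isIn test
  have h3 : (os.filter (fun o => decide (∃ ch ∈ o.toList, PySem.Chars.lowerChar ch = c)))
      = os.filter (fun o => PySem.Str.isIn (String.ofList [c]) (PySem.Str.lower o)) := by
    apply List.filter_congr
    intro o _
    rw [Bool.eq_iff_iff, decide_eq_true_iff, PySem.Str.isIn_iff_infix]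
    simp only [String.toList_ofList, List.singleton_infix_iff, PySem.Str.toList_lower,
      PySem.Chars.lower, List.mem_map]
  rw [h3]
  -- 4: the strict-improvement fold is maxD
  generalize (os.filter (fun o => PySem.Str.isIn (String.ofList [c]) (PySem.Str.lower o))) = xs
  cases xs with
  | nil => simp [PySem.List.maxD, PySem.List.max?]
  | cons x t =>
    simp only [PySem.List.maxD, List.foldl_cons]
    have he : ("" : String).toList = [] := by simp
    have hx : (if PySem.Str.len ("" : String) < PySem.Str.len x then x else "") = x := by
      rcases Nat.eq_zero_or_pos x.toList.length with hz | hz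
      · have hx0 : x = "" := by
          rw [← String.ofList_toList (s := x), List.length_eq_zero_iff.mp hz]
        rw [hx0]
        simp
      · have hlt : PySem.Str.len ("" : String) < PySem.Str.len x := by
          simp only [PySem.Str.len, he, List.length_nil]
          exact_mod_cast hz
        simp [hlt]
    rw [pv_max?_cons, hx]
    simp

lemma pv_A_pairs (os : List String) : ∀ (d : PySem.Dict String String),
    os.foldl (fun d oracion =>
      oracion.toList.foldl (fun d letra =>
        let anterior := PySem.Dict.getD d (PySem.Str.lower (String.ofList [letra])) ""
        if PySem.Str.len anterior < PySem.Str.len oracion then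
          PySem.Dict.insert d (PySem.Str.lower (String.ofList [letra])) oracion
        else d) d) d
      = (pvPairs os).foldl pvStep d := by
  induction os with
  | nil => intro d; rfl
  | cons o t ih =>
    intro d
    simp only [List.foldl_cons, pvPairs, List.flatMap_cons, List.foldl_append]
    rw [← pvPairs, ih]
    congr 1
    rw [List.foldl_map]
    rfl

lemma pv_main (texto : String) : oraciones_mas_largas texto = oraciones_mas_largas_alt texto := by
  unfold oraciones_mas_largas oraciones_mas_largas_alt
  dsimp only
  set os := (PySem.Str.split? texto ".").getD [] with hos
  rw [pv_A_pairs]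
  have hempty : (PySem.Dict.empty : PySem.Dict String String)
      = ⟨([] : List Char).map (fun c => (String.ofList [c], (fun _ => "") c))⟩ := rfl
  rw [hempty, pv_inv (pvPairs os) (pv_pairs_ne os) [] (fun _ => "") (by simp)]
  simp only [PySem.Dict.items, List.not_mem_nil, if_neg, if_false]
  rw [pv_keys_eq]
  apply List.map_congr_left
  intro c _
  rw [pv_val_eq]

-- ===== VERDICT (by name: the statement is the Claim_ definition above) =====
theorem oraciones_mas_largas_spec : Claim_equal_oraciones_mas_largas := by
  intro texto _
  unfold Spec_oraciones_mas_largas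
  exact pv_main texto
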